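-- pv_equiv track=rewrite | github.com/Mesolongo/bioinformatics-python-learning | week2/day1_dictionaries.py | count_nucleotides
-- ===== SOURCE A (Python) =====
-- def count_nucleotides(dna_sequence):
--     # Your code here
--     dna_sequence = dna_sequence.upper()
--     counts = {}
--     dna_bases = 'ATCG'
--
--     for nucleotide in dna_sequence:
--         if nucleotide in dna_bases:
--                 counts[nucleotide] = counts.get(nucleotide, 0) +1
--     return counts
-- ===== SOURCE B (Python) =====
-- def count_nucleotides(dna_sequence):
--     s = dna_sequence.upper()
--     return {b: s.count(b) for b in dict.fromkeys(s) if b in 'ATCG'}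
-- ===== Notes on version B (the rewrite author's own statement) =====
-- stated objective: idiomatic
-- what changed: Replaces the character-by-character loop maintaining a running dict with a dict comprehension over the distinct characters (dict.fromkeys, first-appearance order) that calls s.count(b) once per distinct base.
import Mathlib
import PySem

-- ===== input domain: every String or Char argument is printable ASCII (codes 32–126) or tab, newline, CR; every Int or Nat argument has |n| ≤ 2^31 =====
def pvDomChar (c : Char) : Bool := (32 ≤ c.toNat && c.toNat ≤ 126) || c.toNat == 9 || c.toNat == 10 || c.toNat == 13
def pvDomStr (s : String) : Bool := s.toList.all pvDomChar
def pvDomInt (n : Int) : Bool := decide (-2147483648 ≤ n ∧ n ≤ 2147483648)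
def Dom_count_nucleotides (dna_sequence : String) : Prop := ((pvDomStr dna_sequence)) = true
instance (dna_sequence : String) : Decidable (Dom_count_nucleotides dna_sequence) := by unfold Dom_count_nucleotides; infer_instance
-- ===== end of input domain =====

-- B replaces A's char-by-char counting loop by a dict comprehension over the distinct
-- characters with one s.count(b) per distinct base (idiomatic; same asymptotic cost).

-- ===== PORT A =====
def count_nucleotides (dna_sequence : String) : List (String × Int) :=
  let s := PySem.Str.upper dna_sequence
  let dna_bases := "ATCG"
  let counts : PySem.Dict String Int :=
    s.toList.foldl (fun counts nucleotide =>
      if PySem.Chars.isIn [nucleotide] dna_bases.toList then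
        counts.insert nucleotide.toString (counts.getD nucleotide.toString 0 + 1)
      else counts) PySem.Dict.empty
  counts.items

-- ===== PORT B =====
def count_nucleotides_alt (dna_sequence : String) : List (String × Int) :=
  let s := PySem.Str.upper dna_sequence
  ((PySem.List.dedup s.toList).filter (fun b => PySem.Chars.isIn [b] "ATCG".toList)).map
    (fun b => (b.toString, (PySem.Str.count s b.toString : Int)))

-- ===== PRECONDITION & SPEC =====
def Spec_count_nucleotides (dna_sequence : String) (out : List (String × Int)) : Prop := out = count_nucleotides_alt dna_sequence
instance (dna_sequence : String) (out : List (String × Int)) : Decidable (Spec_count_nucleotides dna_sequence out) := by unfold Spec_count_nucleotides; infer_instance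

-- ===== CLAIM (what is proved, stated in full; the proofs are below) =====
def Claim_equal_count_nucleotides : Prop := ∀ (dna_sequence : String), Dom_count_nucleotides dna_sequence → Spec_count_nucleotides dna_sequence (count_nucleotides dna_sequence)

-- ===== LEMMAS AND PROOFS =====

-- Set.ofList commutes with filter.
theorem pv_ofList_filter {α : Type} [BEq α] [LawfulBEq α] (p : α → Bool) (l : List α) :
    PySem.Set.ofList (l.filter p) = (PySem.Set.ofList l).filter p := by
  induction l with
  | nil => simp [PySem.Set.ofList_nil]
  | cons x xs ih =>
    rw [List.filter_cons]
    by_cases hx : p x = true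
    · rw [if_pos hx, PySem.Set.ofList_cons, PySem.Set.ofList_cons, ih,
        PySem.Set.discard, PySem.Set.discard, List.filter_cons, if_pos hx,
        List.filter_filter, List.filter_filter]
      congr 1
      apply List.filter_congr
      intro a _
      rw [Bool.and_comm]
    · rw [if_neg hx, PySem.Set.ofList_cons, ih, PySem.Set.discard,
        List.filter_cons, if_neg hx, List.filter_filter]
      apply List.filter_congr
      intro a _
      by_cases hax : a = x
      · subst hax; simp [hx]
      · simp [hax]

-- Set.ofList commutes with map by an injective function.
theorem pv_ofList_map {α β : Type} [BEq α] [LawfulBEq α] [BEq β] [LawfulBEq β]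
    (g : α → β) (hg : Function.Injective g) (l : List α) :
    PySem.Set.ofList (l.map g) = (PySem.Set.ofList l).map g := by
  induction l with
  | nil => simp [PySem.Set.ofList_nil]
  | cons x xs ih =>
    simp only [List.map_cons, PySem.Set.ofList_cons, ih, PySem.Set.discard, List.filter_map]
    have h2 : ((fun y => !y == g x) ∘ g) = (fun y : α => !y == x) := by
      funext y; simp [Function.comp, hg.eq_iff]
    rw [h2]

-- Python's str.count with a single-character needle is the character count.
theorem pv_count_go_singleton (c : Char) (l : List Char) :
    ∀ (fuel acc : Nat), l.length ≤ fuel →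
      PySem.Chars.count.go [c] fuel l acc = acc + l.count c := by
  induction l with
  | nil =>
    intro fuel acc _
    cases fuel <;> simp [PySem.Chars.count.go]
  | cons h t ih =>
    intro fuel acc hlen
    cases fuel with
    | zero => simp at hlen
    | succ f =>
      have hlen' : t.length ≤ f := by simpa using hlen
      by_cases hc : h = c
      · have hpre : List.isPrefixOf [c] (h :: t) = true := by simp [List.isPrefixOf, hc]
        simp only [PySem.Chars.count.go, hpre, if_pos]
        rw [show List.drop (List.length [c]) (h :: t) = t by simp]
        rw [ih f (acc + 1) hlen']
        simp [hc]
        omega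
      · have hpre : List.isPrefixOf [c] (h :: t) = false := by
          simp [List.isPrefixOf]
          exact fun h' => hc h'.symm
        simp only [PySem.Chars.count.go, hpre, Bool.false_eq_true]
        rw [ih f acc hlen']
        simp [hc]

theorem pv_chars_count_singleton (l : List Char) (c : Char) :
    PySem.Chars.count l [c] = l.count c := by
  have := pv_count_go_singleton c l l.length 0 (le_refl _)
  simpa [PySem.Chars.count] using this

theorem pv_toString_injective : Function.Injective Char.toString := by
  intro a b h
  have : a.toString.toList = b.toString.toList := by rw [h]
  simpa using this

-- The core equality, for the (already uppercased) string u.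
theorem pv_core (u : String) :
    (u.toList.foldl (fun counts nucleotide =>
        if PySem.Chars.isIn [nucleotide] "ATCG".toList then
          counts.insert nucleotide.toString (counts.getD nucleotide.toString 0 + 1)
        else counts) (PySem.Dict.empty : PySem.Dict String Int)).items
    = ((PySem.List.dedup u.toList).filter (fun b => PySem.Chars.isIn [b] "ATCG".toList)).map
        (fun b => (b.toString, (PySem.Str.count u b.toString : Int))) := by
  set cs := u.toList with hcs
  set p : Char → Bool := fun b => PySem.Chars.isIn [b] "ATCG".toList with hp
  -- A's loop = counter of the filtered, stringified characters
  have hA : (cs.foldl (fun counts nucleotide =>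
        if p nucleotide then
          counts.insert nucleotide.toString (counts.getD nucleotide.toString 0 + 1)
        else counts) (PySem.Dict.empty : PySem.Dict String Int))
      = PySem.Dict.counter ((cs.filter p).map Char.toString) := by
    rw [← PySem.Dict.foldl_insert_getD_add_one_eq_counter, List.foldl_map, List.foldl_filter]
  rw [hA, PySem.Dict.items_counter]
  rw [pv_ofList_map Char.toString pv_toString_injective, pv_ofList_filter]
  rw [List.map_map, PySem.List.dedup_eq_ofList]
  apply List.map_congr_left
  intro b hb
  have hpb : p b = true := List.of_mem_filter hb
  simp only [Function.comp]
  congr 1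
  rw [List.count_map_of_injective _ _ pv_toString_injective, List.count_filter hpb]
  rw [PySem.Str.count_eq]
  have : b.toString.toList = [b] := by simp
  rw [this, pv_chars_count_singleton]

-- ===== VERDICT (by name: the statement is the Claim_ definition above) =====
theorem count_nucleotides_spec : Claim_equal_count_nucleotides := by
  intro dna_sequence _
  unfold Spec_count_nucleotides count_nucleotides count_nucleotides_alt
  exact pv_core (PySem.Str.upper dna_sequence)
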